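-- pv_equiv track=rewrite | github.com/linhdvu14/cp-sols | sols/CodeForces/1729_d3/C_Jumping_on_Tiles.py | solve
-- ===== SOURCE A (Python) =====
-- def solve(S):
--     A = ord(S[0]) - ord('a')
--     B = ord(S[-1]) - ord('a')
--
--     pos = [[] for _ in range(26)]
--     for i, c in enumerate(S):
--         c = ord(c) - ord('a')
--         pos[c].append(i + 1)
--
--     rs = range(A, B+1) if A <= B else range(A, B-1, -1)
--     jumps = []
--     for c in rs: jumps.extend(pos[c])
--     return abs(A - B), len(jumps), jumps
-- ===== SOURCE B (Python) =====
-- ALPHA = 'abcdefghijklmnopqrstuvwxyz'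
--
-- def solve(S):
--     a = ALPHA.index(S[0])
--     b = ALPHA.index(S[-1])
--     lo, hi = min(a, b), max(a, b)
--     sign = 1 if a <= b else -1
--     idx = [i + 1 for i, c in enumerate(S) if lo <= ALPHA.index(c) <= hi]
--     idx.sort(key=lambda i: sign * ALPHA.index(S[i - 1]))
--     return abs(a - b), len(idx), idx
-- ===== Notes on version B (the rewrite author's own statement) =====
-- stated objective: alternative
-- what changed: Replaces A's 26-bucket counting-sort distribution (append each index to its character's bucket, then concatenate the buckets from A to B) with filter-then-stable-comparison-sort: collect the 1-based indices whose character value lies in [min(A,B),max(A,B)] and sort them by signed character value, stability preserving index order within equal characters.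
-- outside the precondition, e.g. on solve('Ga'): A returns (26, 4, [1, 2, 1, 2]), B raises ValueError
import Mathlib
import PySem

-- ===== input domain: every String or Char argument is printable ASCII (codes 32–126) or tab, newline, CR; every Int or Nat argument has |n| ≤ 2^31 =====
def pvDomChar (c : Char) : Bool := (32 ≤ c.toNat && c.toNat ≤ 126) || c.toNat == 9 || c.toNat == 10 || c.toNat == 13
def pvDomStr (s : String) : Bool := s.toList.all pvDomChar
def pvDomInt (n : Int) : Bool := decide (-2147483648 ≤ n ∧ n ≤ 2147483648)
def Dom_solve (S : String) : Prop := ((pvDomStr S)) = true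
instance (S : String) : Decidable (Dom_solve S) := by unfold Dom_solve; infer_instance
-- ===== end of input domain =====

-- B replaces A's 26-bucket distribution (append each 1-based index to its character's
-- bucket, concatenate buckets from A to B) by filter-then-stable-sort: keep the indices
-- whose character value lies in [min(A,B),max(A,B)] and stable-sort them by signed value.
-- Objective: alternative algorithm (comparison sort instead of bucket counting sort).


-- ===== PORT A =====
def solve (S : String) : Int × Int × List Int :=
  let L := S.toList
  let A : Int := (((PySem.List.pyGet? L 0).getD 'a').toNat : Int) - 97
  let B : Int := (((PySem.List.pyGet? L (-1)).getD 'a').toNat : Int) - 97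
  let pos : List (List Int) :=
    (PySem.List.enumerate L).foldl
      (fun pos p =>
        let c : Int := (p.2.toNat : Int) - 97
        PySem.List.pySetD pos c ((PySem.List.pyGetD pos c []) ++ [p.1 + 1]))
      (List.replicate 26 [])
  let rs : List Int :=
    if A ≤ B then PySem.List.pyRange A (B + 1) 1 else PySem.List.pyRange A (B - 1) (-1)
  let jumps : List Int := rs.foldl (fun js c => js ++ PySem.List.pyGetD pos c []) []
  (|A - B|, (jumps.length : Int), jumps)

-- ===== PORT B =====
def solve_alt (S : String) : Int × Int × List Int :=
  let L := S.toList
  let a : Int := PySem.Str.find "abcdefghijklmnopqrstuvwxyz"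
    (String.singleton ((PySem.List.pyGet? L 0).getD 'a'))
  let b : Int := PySem.Str.find "abcdefghijklmnopqrstuvwxyz"
    (String.singleton ((PySem.List.pyGet? L (-1)).getD 'a'))
  let lo : Int := min a b
  let hi : Int := max a b
  let sign : Int := if a ≤ b then 1 else -1
  let idx : List Int :=
    (PySem.List.enumerate L).filterMap
      (fun p =>
        if lo ≤ PySem.Str.find "abcdefghijklmnopqrstuvwxyz" (String.singleton p.2) ∧
            PySem.Str.find "abcdefghijklmnopqrstuvwxyz" (String.singleton p.2) ≤ hi
        then some (p.1 + 1) else none)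
  let key : Int → Int := fun i => sign *
    PySem.Str.find "abcdefghijklmnopqrstuvwxyz"
      (String.singleton ((PySem.List.pyGet? L (i - 1)).getD 'a'))
  let idx' := PySem.List.sorted idx key
  (|a - b|, (idx'.length : Int), idx')

-- ===== PRECONDITION & SPEC =====
-- Pre_ restricts to the problem's natural domain: a nonempty string of lowercase letters.
-- Outside it B raises ValueError (ALPHA.index on a non-lowercase character), while A either
-- raises IndexError (a character value outside [-26,25]) or returns a value produced by
-- Python's negative-list-index wraparound, which merges and duplicates buckets of
-- characters 26 code points apart — an accident of A's bucket table.
def Pre_solve (S : String) : Prop :=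
  S.toList.all (fun c => 97 ≤ c.toNat && c.toNat ≤ 122) = true ∧ S.toList ≠ []
instance (S : String) : Decidable (Pre_solve S) := by unfold Pre_solve; infer_instance
def pvWitness_solve : String := "cba"
def Spec_solve (S : String) (out : Int × Int × List Int) : Prop := out = solve_alt S
instance (S : String) (out : Int × Int × List Int) : Decidable (Spec_solve S out) := by unfold Spec_solve; infer_instance

-- ===== CLAIM (what is proved, stated in full; the proofs are below) =====
def Claim_equal_solve : Prop := ∀ (S : String), Dom_solve S → Pre_solve S → Spec_solve S (solve S)

-- ===== LEMMAS AND PROOFS =====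

-- character value and the bucket of a character value
def chv (c : Char) : Int := (c.toNat : Int) - 97

def bkt (L : List Char) (c : Int) : List Int :=
  (PySem.List.enumerate L).filterMap (fun p => if chv p.2 = c then some (p.1 + 1) else none)

-- ALPHA.index of a lowercase character is its value ord(c) - ord('a')
theorem find_alpha (c : Char) (h1 : 97 ≤ c.toNat) (h2 : c.toNat ≤ 122) :
    PySem.Str.find "abcdefghijklmnopqrstuvwxyz" (String.singleton c) = (c.toNat : Int) - 97 := by
  have hc : Char.ofNat c.toNat = c := Char.ofNat_toNat c
  rw [← hc]
  interval_cases h : c.toNat <;> decide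

-- head of dropWhile fails the predicate
theorem head?_dropWhile_false {α : Type} (p : α → Bool) (l : List α) (x : α)
    (h : (l.dropWhile p).head? = some x) : p x = false := by
  induction l with
  | nil => simp [List.dropWhile] at h
  | cons y ys ih =>
    rw [List.dropWhile_cons] at h
    split at h
    · exact ih h
    · simp_all

-- insertBy walks past ys (never "before") and stops at the head of zs ("before")
theorem insertBy_middle {α : Type} (before : α → α → Bool) (x : α) (ys zs : List α)
    (h1 : ∀ y ∈ ys, before x y = false)
    (h2 : ∀ z, zs.head? = some z → before x z = true) :
    PySem.List.insertBy before x (ys ++ zs) = ys ++ x :: zs := by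
  induction ys with
  | nil =>
    cases zs with
    | nil => simp [PySem.List.insertBy]
    | cons z zs' => simp [PySem.List.insertBy, h2 z rfl]
  | cons y ys ih =>
    have hy : before x y = false := h1 y (by simp)
    simp only [List.cons_append, PySem.List.insertBy, hy, Bool.false_eq_true, if_false]
    exact congrArg (y :: ·) (ih (fun y' hy' => h1 y' (by simp [hy'])))

-- in a strictly increasing list every member is ≤ the last element
theorem le_getLast_of_pairwise_lt (cs : List Int) (h : cs.Pairwise (· < ·)) (y : Int)
    (hy : y ∈ cs) (hne : cs ≠ []) : y ≤ cs.getLast hne := by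
  induction cs with
  | nil => simp at hy
  | cons c cs' ih =>
    by_cases hcs' : cs' = []
    · subst hcs'; simp at hy; simp [hy]
    · rw [List.getLast_cons hcs']
      rcases List.mem_cons.1 hy with rfl | hy'
      · exact le_of_lt ((List.pairwise_cons.1 h).1 _ (List.getLast_mem hcs'))
      · exact ih ((List.pairwise_cons.1 h).2) hy' hcs'

-- STABILITY: Python's stable sort by an Int key equals the concatenation, over the
-- strictly increasing list cs of admissible keys, of the key-c sublists in input order.
theorem sorted_eq_flatMap_buckets {α : Type} (xs : List α) (key : α → Int) (cs : List Int)
    (hp : cs.Pairwise (· < ·)) (hall : ∀ x ∈ xs, key x ∈ cs) :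
    PySem.List.sorted xs key =
      cs.flatMap (fun c => xs.filter (fun x => decide (key x = c))) := by
  induction xs using List.reverseRecOn with
  | nil => simp [PySem.List.sorted_eq_foldl_insertBy]
  | append_singleton xs x ih =>
    have hall' : ∀ y ∈ xs, key y ∈ cs := fun y hy => hall y (by simp [hy])
    have hihx := ih hall'
    set m := key x with hm
    set p : Int → Bool := fun c => decide (c ≤ m) with hpdef
    set cs1 := cs.takeWhile p with hcs1
    set cs2 := cs.dropWhile p with hcs2
    have hsplit : cs1 ++ cs2 = cs := List.takeWhile_append_dropWhile
    have h1 : ∀ c ∈ cs1, c ≤ m := fun c hc => by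
      have := List.mem_takeWhile_imp hc; simpa [hpdef] using this
    have hp1 : cs1.Pairwise (· < ·) := hp.sublist (List.takeWhile_sublist p)
    have hp2 : cs2.Pairwise (· < ·) := hp.sublist (List.dropWhile_sublist p)
    have h2 : ∀ c ∈ cs2, m < c := by
      intro c hc
      cases hcs2' : cs2 with
      | nil => rw [hcs2'] at hc; simp at hc
      | cons z rest =>
        have hz : p z = false := head?_dropWhile_false p cs z (by rw [← hcs2, hcs2']; rfl)
        have hmz : m < z := by simpa [hpdef] using hz
        rw [hcs2'] at hc
        rcases List.mem_cons.1 hc with rfl | hc'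
        · exact hmz
        · exact lt_trans hmz ((List.pairwise_cons.1 (hcs2' ▸ hp2)).1 c hc')
    have hmcs : m ∈ cs := hall x (by simp)
    have hm1 : m ∈ cs1 := by
      rcases (List.mem_append.1 (hsplit ▸ hmcs)) with h | h
      · exact h
      · exact absurd (h2 m h) (lt_irrefl m)
    have hne : cs1 ≠ [] := fun h => by rw [h] at hm1; simp at hm1
    have hlast : cs1.getLast hne = m :=
      le_antisymm (h1 _ (List.getLast_mem hne)) (le_getLast_of_pairwise_lt cs1 hp1 m hm1 hne)
    have hdecomp : cs1.dropLast ++ [m] = cs1 := by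
      rw [← hlast]; exact List.dropLast_append_getLast hne
    have hlt : ∀ c ∈ cs1.dropLast, c < m := by
      intro c hc
      exact (List.pairwise_append.1 (hdecomp ▸ hp1)).2.2 c hc m (by simp)
    have hL : PySem.List.sorted (xs ++ [x]) key =
        PySem.List.insertBy (fun a b => decide (key a < key b)) x (PySem.List.sorted xs key) := by
      rw [PySem.List.sorted_eq_foldl_insertBy, PySem.List.sorted_eq_foldl_insertBy,
        List.foldl_append]
      rfl
    set f : Int → List α := fun c => xs.filter (fun y => decide (key y = c)) with hf
    set F : Int → List α := fun c => (xs ++ [x]).filter (fun y => decide (key y = c)) with hF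
    have hins : PySem.List.insertBy (fun a b => decide (key a < key b)) x
        (cs1.flatMap f ++ cs2.flatMap f) = cs1.flatMap f ++ x :: cs2.flatMap f := by
      apply insertBy_middle
      · intro y hy
        rcases List.mem_flatMap.1 hy with ⟨c, hc, hyf⟩
        have hkey : key y = c := by
          have := List.of_mem_filter hyf; simpa using this
        exact decide_eq_false (by rw [hkey]; exact not_lt.2 (h1 c hc))
      · intro z hz
        rcases List.mem_flatMap.1 (List.mem_of_mem_head? hz) with ⟨c, hc, hzf⟩
        have hkey : key z = c := by
          have := List.of_mem_filter hzf; simpa using this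
        exact decide_eq_true (by rw [hkey]; exact h2 c hc)
    have hsplitbkt : ∀ c : Int, F c = f c ++ if m = c then [x] else [] := by
      intro c
      rw [hF]
      simp only [List.filter_append]
      congr 1
      by_cases hmc : m = c <;> simp [← hm, hmc]
    have hbkt2 : cs2.flatMap F = cs2.flatMap f :=
      List.flatMap_congr (fun c hc => by
        have := h2 c hc
        rw [hsplitbkt c, if_neg (by omega : ¬ (m = c)), List.append_nil])
    have hbkt1d : cs1.dropLast.flatMap F = cs1.dropLast.flatMap f :=
      List.flatMap_congr (fun c hc => by
        have := hlt c hc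
        rw [hsplitbkt c, if_neg (by omega : ¬ (m = c)), List.append_nil])
    have hcs1new : cs1.flatMap F = cs1.flatMap f ++ [x] := by
      conv_lhs => rw [← hdecomp]
      conv_rhs => rw [← hdecomp]
      rw [List.flatMap_append, List.flatMap_append, hbkt1d]
      simp [hsplitbkt m]
    calc PySem.List.sorted (xs ++ [x]) key
        = cs1.flatMap f ++ x :: cs2.flatMap f := by
          rw [hL, hihx, ← hsplit, List.flatMap_append, hins]
      _ = cs.flatMap F := by
          rw [← hsplit, List.flatMap_append, hcs1new, hbkt2]
          simp

-- the character table built by A's first loop: bucket c holds exactly the 1-based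
-- indices of the characters of value c, in index order (all characters lowercase)
theorem pos_fold (L : List Char) (s : Int) (pos0 : List (List Int))
    (hlen : pos0.length = 26)
    (hlc : ∀ ch ∈ L, 97 ≤ ch.toNat ∧ ch.toNat ≤ 122) (c : Int) (h0 : 0 ≤ c) (h26 : c < 26) :
    PySem.List.pyGetD
      ((PySem.List.enumerate L s).foldl
        (fun pos p => PySem.List.pySetD pos ((p.2.toNat : Int) - 97)
          ((PySem.List.pyGetD pos ((p.2.toNat : Int) - 97) []) ++ [p.1 + 1])) pos0) c []
    = PySem.List.pyGetD pos0 c [] ++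
      (PySem.List.enumerate L s).filterMap (fun p => if chv p.2 = c then some (p.1 + 1) else none) := by
  induction L generalizing s pos0 with
  | nil => simp [PySem.List.enumerate_nil]
  | cons ch L' ihL =>
    have hch := hlc ch (by simp)
    have hlc' : ∀ x ∈ L', 97 ≤ x.toNat ∧ x.toNat ≤ 122 := fun x hx => hlc x (by simp [hx])
    rw [PySem.List.enumerate_cons, List.foldl_cons, List.filterMap_cons]
    set d : Int := ((ch.toNat : Int) - 97) with hd
    have hd0 : 0 ≤ d := by omega
    have hd26 : d < 26 := by omega
    have hset : ∀ (v : List Int) (e : Int), 0 ≤ e → e < 26 →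
        PySem.List.pyGetD (PySem.List.pySetD pos0 d v) e [] =
          if e = d then v else PySem.List.pyGetD pos0 e [] := by
      intro v e he0 he26
      have h1 : (d.toNat : Int) = d := by omega
      have h2 : (e.toNat : Int) = e := by omega
      rw [← h1, ← h2,
        PySem.List.pyGetD_pySetD_natCast pos0 d.toNat e.toNat v [] (by omega)]
      by_cases h : e.toNat = d.toNat
      · rw [if_pos h, if_pos (by omega)]
      · rw [if_neg h, if_neg (by omega)]
    rw [ihL (s + 1) _ (by rw [PySem.List.length_pySetD]; exact hlen) hlc',
      hset _ c h0 h26]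
    by_cases hcd : c = d
    · rw [if_pos hcd, if_pos (show chv ch = c by rw [chv, hcd]), hcd]
      simp
    · rw [if_neg hcd, if_neg (show ¬ chv ch = c by rw [chv]; omega)]

-- A's second loop: concatenating the selected buckets of the table
theorem jumps_eq (L : List Char) (hlc : ∀ ch ∈ L, 97 ≤ ch.toNat ∧ ch.toNat ≤ 122)
    (rs : List Int) (hrs : ∀ c ∈ rs, 0 ≤ c ∧ c < 26) :
    rs.foldl (fun js c => js ++ PySem.List.pyGetD
      ((PySem.List.enumerate L 0).foldl
        (fun pos p => PySem.List.pySetD pos ((p.2.toNat : Int) - 97)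
          ((PySem.List.pyGetD pos ((p.2.toNat : Int) - 97) []) ++ [p.1 + 1]))
        (List.replicate 26 [])) c []) []
    = rs.flatMap (bkt L) := by
  rw [PySem.List.foldl_append_eq_flatMap, List.nil_append]
  apply List.flatMap_congr
  intro c hc
  obtain ⟨h0, h26⟩ := hrs c hc
  rw [pos_fold L 0 (List.replicate 26 []) (by simp) hlc c h0 h26]
  have : PySem.List.pyGetD (List.replicate 26 ([] : List Int)) c [] = [] := by
    rw [PySem.List.pyGetD_eq_getElem _ _ h0 (by simp; omega)]
    exact List.getElem_replicate _
  rw [this, List.nil_append, bkt]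

-- B's filtered index list, restricted to one character value, is A's bucket
theorem idx_filter_eq_bkt (L : List Char) (hlc : ∀ ch ∈ L, 97 ≤ ch.toNat ∧ ch.toNat ≤ 122)
    (lo hi σ d c : Int) (hσ : σ = 1 ∨ σ = -1)
    (hd : d = σ * c) (hlo : lo ≤ c) (hhi : c ≤ hi) :
    ((PySem.List.enumerate L).filterMap
        (fun p => if lo ≤ PySem.Str.find "abcdefghijklmnopqrstuvwxyz" (String.singleton p.2) ∧
              PySem.Str.find "abcdefghijklmnopqrstuvwxyz" (String.singleton p.2) ≤ hi
            then some (p.1 + 1) else none)).filter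
      (fun i => decide (σ * PySem.Str.find "abcdefghijklmnopqrstuvwxyz"
        (String.singleton ((PySem.List.pyGet? L (i - 1)).getD 'a')) = d))
    = bkt L c := by
  rw [List.filter_filterMap, bkt]
  apply List.filterMap_congr
  intro p hp
  rcases (PySem.List.mem_enumerate_iff L 0 p).1 hp with ⟨k, hk, rfl⟩
  have hch := hlc (L[k]) (List.getElem_mem hk)
  have hfa : PySem.Str.find "abcdefghijklmnopqrstuvwxyz" (String.singleton (L[k])) =
      ((L[k].toNat : Int)) - 97 := find_alpha _ hch.1 hch.2
  have hget : PySem.List.pyGet? L ((0 + (k : Int)) + 1 - 1) = some L[k] := by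
    have he : (0 + (k : Int)) + 1 - 1 = ((k : Nat) : Int) := by ring
    rw [he, PySem.List.pyGet?_natCast, List.getElem?_eq_getElem hk]
  have hσ0 : σ ≠ 0 := by rcases hσ with rfl | rfl <;> norm_num
  simp only [hfa]
  by_cases hcv : chv (L[k]) = c
  · have hin : lo ≤ ((L[k].toNat : Int)) - 97 ∧ ((L[k].toNat : Int)) - 97 ≤ hi := by
      rw [chv] at hcv; omega
    rw [if_pos hin, if_pos hcv, Option.filter_some, if_pos (by
      rw [decide_eq_true_iff, hget, Option.getD_some, hfa, hd]
      rw [chv] at hcv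
      rw [hcv])]
  · rw [if_neg (show ¬ chv (L[k]) = c from hcv)]
    by_cases hin : lo ≤ ((L[k].toNat : Int)) - 97 ∧ ((L[k].toNat : Int)) - 97 ≤ hi
    · rw [if_pos hin, Option.filter_some, if_neg (by
        rw [decide_eq_true_iff, hget, Option.getD_some, hfa, hd]
        intro hcontra
        exact hcv (by rw [chv]; exact mul_left_cancel₀ hσ0 hcontra))]
    · rw [if_neg hin]
      rfl

-- ===== VERDICT (by name: the statement is the Claim_ definition above) =====
theorem solve_spec : Claim_equal_solve := by
  intro S _ hpre
  obtain ⟨hallb, hne⟩ := hpre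
  have hlc0 : ∀ c ∈ S.toList, 97 ≤ c.toNat ∧ c.toNat ≤ 122 := by
    intro c hc
    simpa using List.all_eq_true.1 hallb c hc
  unfold Spec_solve
  obtain ⟨c0, L0, hL⟩ := List.exists_cons_of_ne_nil hne
  have hlc : ∀ ch ∈ c0 :: L0, 97 ≤ ch.toNat ∧ ch.toNat ≤ 122 := fun ch hch =>
    hlc0 ch (hL ▸ hch)
  have hnecons : c0 :: L0 ≠ [] := by simp
  simp only [solve, solve_alt, hL, PySem.List.pyGet?_zero_cons, PySem.List.pyGet?_neg_one,
    List.getLast?_eq_some_getLast hnecons, Option.getD_some]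
  set L : List Char := c0 :: L0 with hLdef
  have hca := hlc c0 (by rw [hLdef]; exact List.mem_cons_self ..)
  have hcb := hlc (L.getLast hnecons) (List.getLast_mem hnecons)
  rw [find_alpha c0 hca.1 hca.2, find_alpha _ hcb.1 hcb.2]
  set a : Int := (c0.toNat : Int) - 97 with hadef
  set b : Int := ((L.getLast hnecons).toNat : Int) - 97 with hbdef
  have ha : 0 ≤ a ∧ a ≤ 25 := by omega
  have hb : 0 ≤ b ∧ b ≤ 25 := by omega
  by_cases hab : a ≤ b
  · -- ascending: lo = a, hi = b, sign = 1, rs = range(a, b+1)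
    rw [if_pos hab, if_pos hab, min_eq_left hab, max_eq_right hab]
    set K : Int → Int := fun i => 1 * PySem.Str.find "abcdefghijklmnopqrstuvwxyz"
      (String.singleton ((PySem.List.pyGet? L (i - 1)).getD 'a')) with hK
    set idx : List Int :=
      (PySem.List.enumerate L).filterMap
        (fun p => if a ≤ PySem.Str.find "abcdefghijklmnopqrstuvwxyz" (String.singleton p.2) ∧
              PySem.Str.find "abcdefghijklmnopqrstuvwxyz" (String.singleton p.2) ≤ b
            then some (p.1 + 1) else none) with hidx
    set rs : List Int := PySem.List.pyRange a (b + 1) 1 with hrsdef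
    have hrs : ∀ c ∈ rs, 0 ≤ c ∧ c < 26 := by
      intro c hc
      have := PySem.List.mem_pyRange_one.1 hc
      omega
    have hall : ∀ x ∈ idx, K x ∈ rs := by
      intro x hx
      rcases List.mem_filterMap.1 hx with ⟨p, hp, hsome⟩
      rcases (PySem.List.mem_enumerate_iff L 0 p).1 hp with ⟨k, hk, rfl⟩
      have hch := hlc (L[k]) (List.getElem_mem hk)
      have hfa : PySem.Str.find "abcdefghijklmnopqrstuvwxyz" (String.singleton (L[k])) =
          ((L[k].toNat : Int)) - 97 := find_alpha _ hch.1 hch.2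
      rw [hfa] at hsome
      by_cases hin : a ≤ ((L[k].toNat : Int)) - 97 ∧ ((L[k].toNat : Int)) - 97 ≤ b
      · rw [if_pos hin, Option.some.injEq] at hsome
        subst hsome
        have hget : PySem.List.pyGet? L ((0 + (k : Int)) + 1 - 1) = some L[k] := by
          have he : (0 + (k : Int)) + 1 - 1 = ((k : Nat) : Int) := by ring
          rw [he, PySem.List.pyGet?_natCast, List.getElem?_eq_getElem hk]
        rw [hK]
        simp only [hget, Option.getD_some, hfa]
        exact PySem.List.mem_pyRange_one.2 (by omega)
      · rw [if_neg hin] at hsome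
        exact absurd hsome (by simp)
    have h3 : rs.foldl (fun js c => js ++ PySem.List.pyGetD
        ((PySem.List.enumerate L).foldl
          (fun pos p => PySem.List.pySetD pos ((p.2.toNat : Int) - 97)
            ((PySem.List.pyGetD pos ((p.2.toNat : Int) - 97) []) ++ [p.1 + 1]))
          (List.replicate 26 [])) c []) []
        = PySem.List.sorted idx K := by
      calc rs.foldl (fun js c => js ++ PySem.List.pyGetD
            ((PySem.List.enumerate L).foldl
              (fun pos p => PySem.List.pySetD pos ((p.2.toNat : Int) - 97)
                ((PySem.List.pyGetD pos ((p.2.toNat : Int) - 97) []) ++ [p.1 + 1]))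
              (List.replicate 26 [])) c []) []
          = rs.flatMap (bkt L) := jumps_eq L hlc rs hrs
        _ = rs.flatMap (fun c => idx.filter (fun x => decide (K x = c))) :=
            List.flatMap_congr (fun c hc => by
              have hmem := PySem.List.mem_pyRange_one.1 hc
              exact (idx_filter_eq_bkt L hlc a b 1 c c (Or.inl rfl) (by ring) hmem.1
                (by omega)).symm)
        _ = PySem.List.sorted idx K :=
            (sorted_eq_flatMap_buckets idx K rs (PySem.List.pairwise_lt_pyRange_one a (b + 1))
              hall).symm
    rw [h3]
  · -- descending: lo = b, hi = a, sign = -1, rs = range(a, b-1, -1)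
    have hba : b ≤ a := le_of_not_ge hab
    rw [if_neg hab, if_neg hab, min_eq_right hba, max_eq_left hba]
    set K : Int → Int := fun i => -1 * PySem.Str.find "abcdefghijklmnopqrstuvwxyz"
      (String.singleton ((PySem.List.pyGet? L (i - 1)).getD 'a')) with hK
    set idx : List Int :=
      (PySem.List.enumerate L).filterMap
        (fun p => if b ≤ PySem.Str.find "abcdefghijklmnopqrstuvwxyz" (String.singleton p.2) ∧
              PySem.Str.find "abcdefghijklmnopqrstuvwxyz" (String.singleton p.2) ≤ a
            then some (p.1 + 1) else none) with hidx
    set rs : List Int := PySem.List.pyRange a (b - 1) (-1) with hrsdef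
    set cs : List Int := rs.map (fun c => -c) with hcsdef
    have hmem_rs : ∀ c, c ∈ rs ↔ b ≤ c ∧ c ≤ a := by
      intro c
      rw [hrsdef, PySem.List.mem_pyRange_neg_one]
      omega
    have hrs : ∀ c ∈ rs, 0 ≤ c ∧ c < 26 := by
      intro c hc
      have := (hmem_rs c).1 hc
      omega
    have hpcs : cs.Pairwise (· < ·) := by
      rw [hcsdef, List.pairwise_map]
      have : rs = (PySem.List.pyRange b (a + 1) 1).reverse := by
        rw [hrsdef, PySem.List.pyRange_neg_one_eq_reverse]
        norm_num
      rw [this, List.pairwise_reverse]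
      have := PySem.List.pairwise_lt_pyRange_one b (a + 1)
      exact this.imp (by intro x y h; omega)
    have hall : ∀ x ∈ idx, K x ∈ cs := by
      intro x hx
      rcases List.mem_filterMap.1 hx with ⟨p, hp, hsome⟩
      rcases (PySem.List.mem_enumerate_iff L 0 p).1 hp with ⟨k, hk, rfl⟩
      have hch := hlc (L[k]) (List.getElem_mem hk)
      have hfa : PySem.Str.find "abcdefghijklmnopqrstuvwxyz" (String.singleton (L[k])) =
          ((L[k].toNat : Int)) - 97 := find_alpha _ hch.1 hch.2
      rw [hfa] at hsome
      by_cases hin : b ≤ ((L[k].toNat : Int)) - 97 ∧ ((L[k].toNat : Int)) - 97 ≤ a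
      · rw [if_pos hin, Option.some.injEq] at hsome
        subst hsome
        have hget : PySem.List.pyGet? L ((0 + (k : Int)) + 1 - 1) = some L[k] := by
          have he : (0 + (k : Int)) + 1 - 1 = ((k : Nat) : Int) := by ring
          rw [he, PySem.List.pyGet?_natCast, List.getElem?_eq_getElem hk]
        rw [hK]
        simp only [hget, Option.getD_some, hfa]
        rw [hcsdef]
        refine List.mem_map.2 ⟨((L[k].toNat : Int)) - 97, (hmem_rs _).2 (by omega), by ring⟩
      · rw [if_neg hin] at hsome
        exact absurd hsome (by simp)
    have h3 : rs.foldl (fun js c => js ++ PySem.List.pyGetD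
        ((PySem.List.enumerate L).foldl
          (fun pos p => PySem.List.pySetD pos ((p.2.toNat : Int) - 97)
            ((PySem.List.pyGetD pos ((p.2.toNat : Int) - 97) []) ++ [p.1 + 1]))
          (List.replicate 26 [])) c []) []
        = PySem.List.sorted idx K := by
      calc rs.foldl (fun js c => js ++ PySem.List.pyGetD
            ((PySem.List.enumerate L).foldl
              (fun pos p => PySem.List.pySetD pos ((p.2.toNat : Int) - 97)
                ((PySem.List.pyGetD pos ((p.2.toNat : Int) - 97) []) ++ [p.1 + 1]))
              (List.replicate 26 [])) c []) []
          = rs.flatMap (bkt L) := jumps_eq L hlc rs hrs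
        _ = cs.flatMap (fun c' => idx.filter (fun x => decide (K x = c'))) := by
            rw [hcsdef, List.flatMap_map]
            exact (List.flatMap_congr (fun c hc => by
              have hmem := (hmem_rs c).1 hc
              exact idx_filter_eq_bkt L hlc b a (-1) (-c) c (Or.inr rfl) (by ring) hmem.1
                hmem.2)).symm
        _ = PySem.List.sorted idx K :=
            (sorted_eq_flatMap_buckets idx K cs hpcs hall).symm
    rw [h3]
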